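-- pv_equiv track=rewrite | github.com/nmtrmail/trap-gen | trap/decoder.py | expandPatterns
-- ===== SOURCE A (Python) =====
-- def expandPatterns(curPattern, genericPattern, tablePattern):
--     """Recursively computes all possible strings (curPattern) conforming to an
--     instruction (genericPattern) masked by some mask (tablePattern):
--     genericPattern is the instruction coding {(0,1,x)} and tablePattern is the
--     mask {(0,1): 0=don't-care && 1=test}. If the set-bits in the mask {1} are
--     also set in the instruction {0,1}, instr & mask is returned. If the mask
--     tests don't-care bits, a list of curPattern is returned, where a result is
--     generated for each possible outcome. Example:
--     genericPattern = 10x1, tablePattern = 1110, curPattern = (100x, 101x)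
--     Note that the number of returned patterns is 2^dont't-care-bits."""
--     if len(curPattern) < len(genericPattern):
--         if tablePattern[len(curPattern)] == 1:
--             # Bit is set by mask but not defined by instruction:
--             # Return both possibilities.
--             if genericPattern[len(curPattern)] == None:
--                 return expandPatterns(curPattern + [1], genericPattern, tablePattern) + expandPatterns(curPattern + [0], genericPattern, tablePattern)
--             # Bit is defined by instruction and set by mask:
--             # Return bit value in instruction.
--             else:
--                 return expandPatterns(curPattern + [genericPattern[len(curPattern)]], genericPattern, tablePattern)
--         # Bit is not set by mask:
--         # Return don't-care whether it is defined by the instruction or not.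
--         else:
--             return expandPatterns(curPattern + [None], genericPattern, tablePattern)
--     else:
--         return [curPattern]
-- ===== SOURCE B (Python) =====
-- def expandPatterns(curPattern, genericPattern, tablePattern):
--     """Iterative worklist version: expand one bit position per round,
--     left to right, instead of recursing per branch."""
--     results = [list(curPattern)]
--     for i in range(len(curPattern), len(genericPattern)):
--         newResults = []
--         for p in results:
--             if tablePattern[i] == 1:
--                 if genericPattern[i] == None:
--                     newResults.append(p + [1])
--                     newResults.append(p + [0])
--                 else:
--                     newResults.append(p + [genericPattern[i]])
--             else:
--                 newResults.append(p + [None])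
--         results = newResults
--     return results
-- ===== Notes on version B (the rewrite author's own statement) =====
-- stated objective: simpler
-- what changed: Replaced the branching per-bit tail recursion with an iterative worklist: a single left-to-right loop over bit positions that expands every partial pattern of the current level at once.
import Mathlib
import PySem

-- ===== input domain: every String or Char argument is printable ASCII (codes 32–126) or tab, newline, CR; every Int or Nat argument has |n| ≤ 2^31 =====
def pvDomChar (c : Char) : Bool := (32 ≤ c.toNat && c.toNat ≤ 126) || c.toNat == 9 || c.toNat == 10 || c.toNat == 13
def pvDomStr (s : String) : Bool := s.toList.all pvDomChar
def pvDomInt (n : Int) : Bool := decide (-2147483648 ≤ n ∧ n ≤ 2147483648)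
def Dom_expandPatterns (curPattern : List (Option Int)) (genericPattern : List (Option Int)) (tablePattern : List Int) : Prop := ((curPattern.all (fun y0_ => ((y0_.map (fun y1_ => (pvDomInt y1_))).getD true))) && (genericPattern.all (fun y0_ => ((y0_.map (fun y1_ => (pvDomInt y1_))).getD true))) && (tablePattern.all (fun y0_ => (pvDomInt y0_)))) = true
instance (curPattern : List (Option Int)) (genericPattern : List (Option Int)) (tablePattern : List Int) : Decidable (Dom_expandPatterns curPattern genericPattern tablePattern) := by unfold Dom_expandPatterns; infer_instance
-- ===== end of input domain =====

-- B replaces A's per-branch tail recursion by an iterative worklist that expands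
-- one bit position per round (objective: simpler decomposition, same cost).

-- ===== PORT A =====
-- literal transliteration of A's recursion; pyGetD's default is only reached
-- outside Pre_ (where Python raises IndexError)
def expandPatterns (curPattern : List (Option Int)) (genericPattern : List (Option Int)) (tablePattern : List Int) : List (List (Option Int)) :=
  if _h : curPattern.length < genericPattern.length then
    if PySem.List.pyGetD tablePattern (curPattern.length : Int) 0 == 1 then
      match PySem.List.pyGetD genericPattern (curPattern.length : Int) none with
      | none =>
          expandPatterns (curPattern ++ [some 1]) genericPattern tablePattern ++
          expandPatterns (curPattern ++ [some 0]) genericPattern tablePattern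
      | some v =>
          expandPatterns (curPattern ++ [some v]) genericPattern tablePattern
    else
      expandPatterns (curPattern ++ [none]) genericPattern tablePattern
  else
    [curPattern]
termination_by genericPattern.length - curPattern.length
decreasing_by all_goals (simp; omega)

-- ===== PORT B =====
-- the choices appended for one partial pattern p at bit position i
def pvChoice (genericPattern : List (Option Int)) (tablePattern : List Int) (i : Int) (p : List (Option Int)) : List (List (Option Int)) :=
  if PySem.List.pyGetD tablePattern i 0 == 1 then
    match PySem.List.pyGetD genericPattern i none with
    | none => [p ++ [some 1], p ++ [some 0]]
    | some v => [p ++ [some v]]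
  else [p ++ [none]]

-- iterative worklist: outer loop over bit positions, inner loop over the level
def expandPatterns_alt (curPattern : List (Option Int)) (genericPattern : List (Option Int)) (tablePattern : List Int) : List (List (Option Int)) :=
  (PySem.List.pyRange (curPattern.length : Int) (genericPattern.length : Int) 1).foldl
    (fun results i =>
      results.foldl (fun newResults p => newResults ++ pvChoice genericPattern tablePattern i p) [])
    [curPattern]

-- ===== PRECONDITION & SPEC =====
-- Pre_ excludes exactly the inputs on which A raises IndexError: the recursion
-- reads tablePattern[i] for every i from len(curPattern) up to len(genericPattern)-1.
def Pre_expandPatterns (curPattern : List (Option Int)) (genericPattern : List (Option Int)) (tablePattern : List Int) : Prop :=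
  genericPattern.length ≤ curPattern.length ∨ genericPattern.length ≤ tablePattern.length
instance (curPattern : List (Option Int)) (genericPattern : List (Option Int)) (tablePattern : List Int) : Decidable (Pre_expandPatterns curPattern genericPattern tablePattern) := by unfold Pre_expandPatterns; infer_instance

def pvWitness_expandPatterns : List (Option Int) × List (Option Int) × List Int :=
  ([], [some 1, none, some 0], [1, 1, 0])

def Spec_expandPatterns (curPattern : List (Option Int)) (genericPattern : List (Option Int)) (tablePattern : List Int) (out : List (List (Option Int))) : Prop := out = expandPatterns_alt curPattern genericPattern tablePattern
instance (curPattern : List (Option Int)) (genericPattern : List (Option Int)) (tablePattern : List Int) (out : List (List (Option Int))) : Decidable (Spec_expandPatterns curPattern genericPattern tablePattern out) := by unfold Spec_expandPatterns; infer_instance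

-- ===== CLAIM (what is proved, stated in full; the proofs are below) =====
def Claim_equal_expandPatterns : Prop := ∀ (curPattern : List (Option Int)) (genericPattern : List (Option Int)) (tablePattern : List Int), Dom_expandPatterns curPattern genericPattern tablePattern → Pre_expandPatterns curPattern genericPattern tablePattern → Spec_expandPatterns curPattern genericPattern tablePattern (expandPatterns curPattern genericPattern tablePattern)

-- ===== LEMMAS AND PROOFS =====

-- proof-side runner: the worklist loop with the inner foldl already flattened
def pvRun (genericPattern : List (Option Int)) (tablePattern : List Int) (l : List Int) (rs : List (List (Option Int))) : List (List (Option Int)) :=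
  l.foldl (fun rs i => rs.flatMap (pvChoice genericPattern tablePattern i)) rs

theorem alt_eq_run (curPattern genericPattern : List (Option Int)) (tablePattern : List Int) :
    expandPatterns_alt curPattern genericPattern tablePattern =
      pvRun genericPattern tablePattern (PySem.List.pyRange (curPattern.length : Int) (genericPattern.length : Int) 1) [curPattern] := by
  unfold expandPatterns_alt pvRun
  congr 1
  funext rs i
  rw [PySem.List.foldl_append_eq_flatMap]
  exact List.nil_append _

theorem pvRun_cons (genericPattern : List (Option Int)) (tablePattern : List Int) (i : Int) (l : List Int) (rs : List (List (Option Int))) :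
    pvRun genericPattern tablePattern (i :: l) rs = pvRun genericPattern tablePattern l (rs.flatMap (pvChoice genericPattern tablePattern i)) := rfl

theorem run_append (genericPattern : List (Option Int)) (tablePattern : List Int) (l : List Int) :
    ∀ rs1 rs2, pvRun genericPattern tablePattern l (rs1 ++ rs2) =
      pvRun genericPattern tablePattern l rs1 ++ pvRun genericPattern tablePattern l rs2 := by
  induction l with
  | nil => intro rs1 rs2; rfl
  | cons i l ih =>
      intro rs1 rs2
      simp only [pvRun, List.foldl_cons, List.flatMap_append] at *
      exact ih _ _

theorem a_eq_run (genericPattern : List (Option Int)) (tablePattern : List Int) :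
    ∀ (d : Nat) (curPattern : List (Option Int)), d = genericPattern.length - curPattern.length →
      expandPatterns curPattern genericPattern tablePattern =
        pvRun genericPattern tablePattern (PySem.List.pyRange (curPattern.length : Int) (genericPattern.length : Int) 1) [curPattern] := by
  intro d
  induction d with
  | zero =>
      intro cur hd
      have hge : genericPattern.length ≤ cur.length := by omega
      rw [expandPatterns]
      rw [dif_neg (by omega)]
      rw [PySem.List.pyRange_one_eq_nil (by exact_mod_cast hge)]
      rfl
  | succ k ih =>
      intro cur hd
      have hlt : cur.length < genericPattern.length := by omega
      have hcons : PySem.List.pyRange (cur.length : Int) (genericPattern.length : Int) 1 =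
          (cur.length : Int) :: PySem.List.pyRange ((cur.length : Int) + 1) (genericPattern.length : Int) 1 :=
        PySem.List.pyRange_one_cons (by exact_mod_cast hlt)
      have hlen : ∀ x : Option Int, ((cur ++ [x]).length : Int) = (cur.length : Int) + 1 := by
        intro x; simp
      have ihx : ∀ x : Option Int,
          expandPatterns (cur ++ [x]) genericPattern tablePattern =
            pvRun genericPattern tablePattern (PySem.List.pyRange ((cur.length : Int) + 1) (genericPattern.length : Int) 1) [cur ++ [x]] := by
        intro x
        have := ih (cur ++ [x]) (by simp; omega)
        rwa [hlen x] at this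
      rw [expandPatterns, dif_pos hlt, hcons, pvRun_cons]
      have hstep : [cur].flatMap (pvChoice genericPattern tablePattern (cur.length : Int)) =
          pvChoice genericPattern tablePattern (cur.length : Int) cur := by simp
      rw [hstep]
      unfold pvChoice
      by_cases ht : PySem.List.pyGetD tablePattern (cur.length : Int) 0 == 1
      · rw [if_pos ht]
        cases hg : PySem.List.pyGetD genericPattern (cur.length : Int) none with
        | none =>
            simp only [ht, if_pos]
            rw [ihx (some 1), ihx (some 0)]
            have hsplit : ([cur ++ [some 1], cur ++ [some 0]] : List (List (Option Int))) = [cur ++ [some 1]] ++ [cur ++ [some 0]] := rfl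
            rw [hsplit, run_append]
        | some v =>
            simp only [ht, if_pos]
            exact ihx (some v)
      · rw [if_neg ht]
        simp only [ht, if_neg, Bool.false_eq_true, not_false_iff]
        exact ihx none

-- ===== VERDICT (by name: the statement is the Claim_ definition above) =====
theorem expandPatterns_spec : Claim_equal_expandPatterns := by
  intro cur generic table _hdom _hpre
  unfold Spec_expandPatterns
  rw [alt_eq_run]
  exact a_eq_run generic table _ cur rfl
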